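-- pv_equiv track=rewrite | github.com/comst007/myDataStructureAndAlgorithm | str_match_bm.py | suffix
-- ===== SOURCE A (Python) =====
-- def suffix(pat:str):
--     m = len(pat)
--     arr_suf = [m] * m
--     for i in range(m - 2, -1, -1):
--         j = i
--         k = m - 1
--         while j >= 0 and pat[j] == pat[k]:
--             j = j - 1
--             k = k - 1
--         arr_suf[i] = i - j
--
--     return arr_suf
-- ===== SOURCE B (Python) =====
-- def suffix(pat: str):
--     # Z-algorithm on the reversed pattern: maintain the rightmost match window
--     # [l, l+r-l) so each Z-value starts from a reused count; O(m) total.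
--     m = len(pat)
--     if m == 0:
--         return []
--     rev = pat[::-1]
--     z = [0]  # z[0] is a placeholder, set to m at the end
--     l = r = 0
--     for k in range(1, m):
--         if k < r:
--             c = min(z[k - l], r - k)
--         else:
--             c = 0
--         while k + c < m and rev[c] == rev[k + c]:
--             c += 1
--         z.append(c)
--         if k + c > r:
--             l, r = k, k + c
--     z[0] = m
--     return z[::-1]
-- ===== Notes on version B (the rewrite author's own statement) =====
-- stated objective: faster
-- what changed: B computes the Z-array of the reversed pattern with the standard rightmost-window reuse (each new position starts its match count from min(z[k-l], r-k)), then reverses it, instead of A's independent backward two-pointer scan from every position.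
import Mathlib
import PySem

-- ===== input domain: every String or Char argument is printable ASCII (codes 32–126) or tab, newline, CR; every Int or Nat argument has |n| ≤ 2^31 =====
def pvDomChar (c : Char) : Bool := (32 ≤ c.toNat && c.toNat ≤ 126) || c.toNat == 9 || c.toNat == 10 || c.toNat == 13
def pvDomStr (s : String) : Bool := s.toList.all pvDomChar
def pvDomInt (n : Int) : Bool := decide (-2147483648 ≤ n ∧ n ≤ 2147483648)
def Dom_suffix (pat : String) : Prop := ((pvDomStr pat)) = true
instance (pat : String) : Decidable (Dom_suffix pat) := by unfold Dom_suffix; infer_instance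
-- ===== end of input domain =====

-- B computes the Z-array of the reversed pattern with the standard
-- rightmost-window reuse (Z-algorithm) and reverses it, instead of A's
-- independent backward two-pointer scan from every position (faster: O(m) vs O(m^2)).

-- ===== PORT A =====
-- the inner `while j >= 0 and pat[j] == pat[k]` loop; returns the final j
def suffixWhile (s : List Char) (j k : Int) : Int :=
  if h : 0 ≤ j ∧ PySem.List.pyGet? s j = PySem.List.pyGet? s k then
    suffixWhile s (j - 1) (k - 1)
  else j
termination_by (j + 1).toNat
decreasing_by omega

def suffix (pat : String) : List Int :=
  let s := pat.toList
  let m : Int := PySem.Str.len pat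
  let arrSuf : List Int := List.replicate m.toNat m
  (PySem.List.pyRange (m - 2) (-1) (-1)).foldl
    (fun arr i => PySem.List.pySetD arr i (i - suffixWhile s i (m - 1))) arrSuf

-- ===== PORT B =====
-- the inner `while k + c < m and rev[c] == rev[k + c]` extension loop of B
def extendLoop (rev : List Char) (k c : Nat) : Nat :=
  if h : k + c < rev.length ∧ rev[c]? = rev[k + c]? then
    extendLoop rev k (c + 1)
  else c
termination_by rev.length - (k + c)
decreasing_by omega

-- the `for k in range(1, m)` loop of B; z holds z[0..k-1] built so far.
-- z[k-l] is read with default 0: in the Python the index is always in range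
-- whenever the read happens (k < r forces l ≥ 1), so this is exact.
def zLoop (rev : List Char) (k : Nat) (z : List Nat) (l r : Nat) : List Nat :=
  if _hk : k < rev.length then
    let c0 : Nat := if k < r then min (z.getD (k - l) 0) (r - k) else 0
    let c := extendLoop rev k c0
    if r < k + c then zLoop rev (k + 1) (z ++ [c]) k (k + c)
    else zLoop rev (k + 1) (z ++ [c]) l r
  else z
termination_by rev.length - k
decreasing_by all_goals omega

def suffix_alt (pat : String) : List Int :=
  let m := pat.length
  if m = 0 then []
  else
    let rev := pat.toList.reverse
    let z := zLoop rev 1 [0] 0 0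
    ((z.set 0 m).reverse).map (fun n => Int.ofNat n)

-- ===== PRECONDITION & SPEC =====
def Spec_suffix (pat : String) (out : List Int) : Prop := out = suffix_alt pat
instance (pat : String) (out : List Int) : Decidable (Spec_suffix pat out) := by unfold Spec_suffix; infer_instance

-- ===== CLAIM (what is proved, stated in full; the proofs are below) =====
def Claim_equal_suffix : Prop := ∀ (pat : String), Dom_suffix pat → Spec_suffix pat (suffix pat)

-- ===== LEMMAS AND PROOFS =====

-- mathematical longest-common-prefix length, the bridge between the two programs
def lcpN : List Char → List Char → Nat
  | x :: xs, y :: ys => if x = y then lcpN xs ys + 1 else 0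
  | _, _ => 0

lemma lcpN_nil_right (xs : List Char) : lcpN xs [] = 0 := by
  cases xs <;> simp [lcpN]

lemma lcpN_nil_left (ys : List Char) : lcpN [] ys = 0 := by
  cases ys <;> simp [lcpN]

lemma lcpN_comm (xs ys : List Char) : lcpN xs ys = lcpN ys xs := by
  induction xs generalizing ys with
  | nil => cases ys <;> simp [lcpN]
  | cons x xs ih => cases ys with
    | nil => simp [lcpN]
    | cons y ys =>
      rcases eq_or_ne x y with h | h
      · subst h; simp [lcpN, ih]
      · simp [lcpN, h, Ne.symm h]

lemma lcpN_self (xs : List Char) : lcpN xs xs = xs.length := by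
  induction xs with
  | nil => simp [lcpN]
  | cons x xs ih => simp [lcpN, ih]

lemma lcpN_le_left (xs ys : List Char) : lcpN xs ys ≤ xs.length := by
  induction xs generalizing ys with
  | nil => simp [lcpN_nil_left]
  | cons x xs ih => cases ys with
    | nil => simp [lcpN]
    | cons y ys =>
      by_cases h : x = y <;> simp [lcpN, h]
      have := ih ys; omega

lemma lcpN_le_right (xs ys : List Char) : lcpN xs ys ≤ ys.length := by
  rw [lcpN_comm]; exact lcpN_le_left ys xs

lemma getElem?_eq_of_lt_lcpN (xs ys : List Char) (j : Nat) (h : j < lcpN xs ys) :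
    xs[j]? = ys[j]? := by
  induction xs generalizing ys j with
  | nil => simp [lcpN_nil_left] at h
  | cons x xs ih => cases ys with
    | nil => simp [lcpN_nil_right] at h
    | cons y ys =>
      by_cases hxy : x = y
      · cases j with
        | zero => simp [hxy]
        | succ j =>
          simp only [lcpN, if_pos hxy] at h
          simpa using ih ys j (by omega)
      · simp [lcpN, hxy] at h

lemma le_lcpN_of (xs ys : List Char) (c : Nat)
    (h1 : c ≤ xs.length) (h2 : c ≤ ys.length)
    (h : ∀ j, j < c → xs[j]? = ys[j]?) : c ≤ lcpN xs ys := by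
  induction c generalizing xs ys with
  | zero => omega
  | succ c ih =>
    cases xs with
    | nil => simp at h1
    | cons x xs => cases ys with
      | nil => simp at h2
      | cons y ys =>
        have h0 := h 0 (by omega)
        simp at h0
        have : c ≤ lcpN xs ys := by
          apply ih xs ys (by simpa using h1) (by simpa using h2)
          intro j hj
          simpa using h (j + 1) (by omega)
        simp [lcpN, h0]; omega

lemma lcpN_drop_of_le (xs ys : List Char) (c : Nat) (h : c ≤ lcpN xs ys) :
    c + lcpN (xs.drop c) (ys.drop c) = lcpN xs ys := by
  induction c generalizing xs ys with
  | zero => simp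
  | succ c ih =>
    cases xs with
    | nil => simp [lcpN_nil_left] at h
    | cons x xs => cases ys with
      | nil => simp [lcpN_nil_right] at h
      | cons y ys =>
        by_cases hxy : x = y
        · simp only [lcpN, if_pos hxy] at h ⊢
          have := ih xs ys (by omega)
          simp only [List.drop_succ_cons]
          omega
        · simp [lcpN, hxy] at h

-- the extension loop computes c plus the remaining common-prefix length
lemma extendLoop_eq (rev : List Char) (k : Nat) :
    ∀ (t c : Nat), rev.length - (k + c) ≤ t →
      extendLoop rev k c = c + lcpN (rev.drop c) (rev.drop (k + c)) := by
  intro t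
  induction t with
  | zero =>
    intro c h
    rw [extendLoop, dif_neg (fun hh => absurd hh.1 (by omega))]
    rw [List.drop_eq_nil_of_le (by omega : rev.length ≤ k + c), lcpN_nil_right]
    simp
  | succ t ih =>
    intro c h
    rw [extendLoop]
    by_cases hg : k + c < rev.length ∧ rev[c]? = rev[k + c]?
    · rw [dif_pos hg, ih (c + 1) (by omega), (by omega : k + (c + 1) = k + c + 1)]
      obtain ⟨h1, h2⟩ := hg
      have hc : c < rev.length := by omega
      have heq : rev[c] = rev[k + c] := by
        simpa [List.getElem?_eq_getElem hc, List.getElem?_eq_getElem h1] using h2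
      rw [List.drop_eq_getElem_cons hc, List.drop_eq_getElem_cons h1]
      simp only [lcpN, if_pos heq]
      omega
    · rw [dif_neg hg]
      by_cases h1 : k + c < rev.length
      · have h2 : rev[c]? ≠ rev[k + c]? := fun hh => hg ⟨h1, hh⟩
        have hc : c < rev.length := by omega
        have hne : rev[c] ≠ rev[k + c] := by
          intro he; exact h2 (by simp [List.getElem?_eq_getElem hc, List.getElem?_eq_getElem h1, he])
        rw [List.drop_eq_getElem_cons hc, List.drop_eq_getElem_cons h1]
        simp [lcpN, hne]
      · rw [List.drop_eq_nil_of_le (by omega : rev.length ≤ k + c), lcpN_nil_right]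
        simp

-- the Z-value at position k, as a mathematical function
def zf (rev : List Char) (k : Nat) : Nat := lcpN rev (rev.drop k)

-- soundness of the window reuse: the starting count never exceeds the true Z-value
lemma start_le_zf (rev : List Char) (k l r : Nat) (hl : l < k) (hkr : k < r)
    (hr1 : r ≤ l + zf rev l) (hrm : r ≤ rev.length) :
    min (zf rev (k - l)) (r - k) ≤ zf rev k := by
  set c0 := min (zf rev (k - l)) (r - k) with hc0
  apply le_lcpN_of
  · have := lcpN_le_left rev (rev.drop (k - l)); omega
  · simp only [List.length_drop]; omega
  · intro j hj
    have hj1 : j < zf rev (k - l) := by omega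
    have hj2 : k - l + j < zf rev l := by omega
    have e1 := getElem?_eq_of_lt_lcpN rev (rev.drop (k - l)) j hj1
    have e2 := getElem?_eq_of_lt_lcpN rev (rev.drop l) (k - l + j) hj2
    rw [List.getElem?_drop] at e1 e2
    rw [(by omega : l + (k - l + j) = k + j)] at e2
    rw [List.getElem?_drop]
    rw [e1, e2]

lemma zf_le (rev : List Char) (k : Nat) : zf rev k ≤ rev.length - k := by
  have := lcpN_le_right rev (rev.drop k)
  simpa [zf] using this

-- main loop invariant: zLoop extends z by the true Z-values of positions k..m-1
lemma zLoop_spec (rev : List Char) :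
    ∀ (t k : Nat) (z : List Nat) (l r : Nat), rev.length - k ≤ t →
      1 ≤ k → z.length = k →
      (∀ j, 1 ≤ j → j < k → z.getD j 0 = zf rev j) →
      l < k → r ≤ l + zf rev l → r ≤ rev.length →
      zLoop rev k z l r = z ++ (List.range' k (rev.length - k)).map (zf rev) := by
  intro t
  induction t with
  | zero =>
    intro k z l r ht hk hz hzv hl hr1 hrm
    rw [zLoop, dif_neg (by omega)]
    rw [(by omega : rev.length - k = 0)]
    simp
  | succ t ih =>
    intro k z l r ht hk hz hzv hl hr1 hrm
    by_cases hkm : k < rev.length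
    · rw [zLoop, dif_pos hkm]
      have hc0 : (if k < r then min (z.getD (k - l) 0) (r - k) else 0) ≤ zf rev k := by
        split_ifs with hkr
        · by_cases hl1 : 1 ≤ l
          · rw [hzv (k - l) (by omega) (by omega)]
            exact start_le_zf rev k l r hl hkr hr1 hrm
          · -- l = 0: z.getD k 0 = 0 (index out of range), so the min is 0
            have hl0 : l = 0 := by omega
            rw [hl0]
            rw [List.getD_eq_default _ _ (by omega)]
            simp
        · exact Nat.zero_le _
      have hcz : extendLoop rev k (if k < r then min (z.getD (k - l) 0) (r - k) else 0)
          = zf rev k := by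
        rw [extendLoop_eq rev k (rev.length - (k + _)) _ le_rfl]
        calc _ = lcpN (rev.drop 0) (rev.drop (k + 0)) := by
                rw [← lcpN_drop_of_le (rev.drop 0) (rev.drop (k + 0)) _ (by simpa [zf] using hc0)]
                simp [List.drop_drop]
             _ = zf rev k := by simp [zf]
      simp only [hcz]
      have hznew : ∀ j, 1 ≤ j → j < k + 1 → (z ++ [zf rev k]).getD j 0 = zf rev j := by
        intro j hj1 hj2
        by_cases hjk : j < k
        · rw [List.getD_append _ _ _ _ (by omega)]
          exact hzv j hj1 hjk
        · have : j = k := by omega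
          subst this
          rw [List.getD_eq_getElem?_getD, List.getElem?_append_right (by omega)]
          simp [hz]
      have hrange : rev.length - k = (rev.length - (k + 1)) + 1 := by omega
      have hsplit : (List.range' k (rev.length - k)).map (zf rev)
          = zf rev k :: (List.range' (k + 1) (rev.length - (k + 1))).map (zf rev) := by
        rw [hrange, List.range'_succ]
        simp
      have hzk_le : zf rev k ≤ rev.length - k := zf_le rev k
      split_ifs with hupd
      · rw [ih (k + 1) (z ++ [zf rev k]) k (k + zf rev k) (by omega) (by omega)
            (by simp [hz]) hznew (by omega) (by omega) (by omega)]
        rw [hsplit]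
        simp
      · rw [ih (k + 1) (z ++ [zf rev k]) l r (by omega) (by omega)
            (by simp [hz]) hznew (by omega) hr1 hrm]
        rw [hsplit]
        simp
    · rw [zLoop, dif_neg hkm]
      rw [(by omega : rev.length - k = 0)]
      simp

-- B computes the reversed Z-array (with zf 0 = m) of the reversed pattern
lemma suffix_alt_eq (pat : String) :
    suffix_alt pat
      = ((List.range pat.toList.reverse.length).map
          (fun k => ((zf pat.toList.reverse k : Nat) : Int))).reverse := by
  unfold suffix_alt
  by_cases hm : pat.length = 0
  · rw [if_pos hm]
    have : pat.toList = [] := by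
      have := pat.length_toList
      exact List.eq_nil_of_length_eq_zero (by omega)
    simp [this]
  · rw [if_neg hm]
    show ((((zLoop pat.toList.reverse 1 [0] 0 0).set 0 pat.length).reverse).map
        (fun n => Int.ofNat n)) = _
    set rev := pat.toList.reverse with hrev
    have hlen : rev.length = pat.length := by simp [hrev]
    have h1 : 1 ≤ pat.length := by omega
    rw [zLoop_spec rev (rev.length - 1) 1 [0] 0 0 le_rfl le_rfl rfl
        (by intro j hj1 hj2; omega) (by omega) (by simp) (by omega)]
    have hz0 : zf rev 0 = pat.length := by
      simp [zf, lcpN_self, hlen]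
    have hset : (([0] ++ (List.range' 1 (rev.length - 1)).map (zf rev)).set 0 pat.length)
        = (List.range rev.length).map (zf rev) := by
      have hr : List.range rev.length = 0 :: List.range' 1 (rev.length - 1) := by
        rw [List.range_eq_range', (by omega : rev.length = (rev.length - 1) + 1),
            List.range'_succ]
        simp
      rw [hr]
      simp [hz0]
    rw [hset, List.map_reverse, List.map_map]
    rfl

lemma take_succ_reverse (L : List Char) (n : Nat) (h : n < L.length) :
    (L.take (n + 1)).reverse = L[n] :: (L.take n).reverse := by
  rw [List.take_succ_eq_append_getElem h, List.reverse_append]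
  simp

lemma suffixWhile_eq (L : List Char) (t : Nat) (j k : Int)
    (ht : (j + 1).toNat ≤ t) (hj : -1 ≤ j) (hjk : j < k) (hk : k < L.length) :
    suffixWhile L j k =
      j - lcpN ((L.take (j + 1).toNat).reverse) ((L.take (k + 1).toNat).reverse) := by
  induction t generalizing j k with
  | zero =>
    have hj1 : j = -1 := by omega
    subst hj1
    rw [suffixWhile, dif_neg (fun hh => by omega)]
    norm_num [lcpN_nil_left]
  | succ t ih =>
    by_cases hj0 : 0 ≤ j
    · have hk0 : 0 ≤ k := by omega
      have hjlen : j < L.length := by omega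
      have hgj := PySem.List.pyGet?_eq_some_getElem L hj0 (by exact_mod_cast hjlen)
      have hgk := PySem.List.pyGet?_eq_some_getElem L hk0 (by exact_mod_cast hk)
      have hjt : (j + 1).toNat = j.toNat + 1 := by omega
      have hkt : (k + 1).toNat = k.toNat + 1 := by omega
      have hjn : j.toNat < L.length := by omega
      have hkn : k.toNat < L.length := by omega
      rw [hjt, hkt, take_succ_reverse L j.toNat hjn, take_succ_reverse L k.toNat hkn]
      by_cases heq : L[j.toNat] = L[k.toNat]
      · rw [suffixWhile, dif_pos ⟨hj0, by rw [hgj, hgk, heq]⟩]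
        rw [ih (j - 1) (k - 1) (by omega) (by omega) (by omega) (by omega)]
        rw [(by omega : (j - 1 + 1).toNat = j.toNat), (by omega : (k - 1 + 1).toNat = k.toNat)]
        simp only [lcpN, if_pos heq]
        push_cast; ring
      · rw [suffixWhile, dif_neg (fun hh => heq (by
          have := hh.2
          rw [hgj, hgk] at this
          exact Option.some.inj this))]
        simp [lcpN, heq]
    · have hj1 : j = -1 := by omega
      subst hj1
      rw [suffixWhile, dif_neg (fun hh => by omega)]
      norm_num [lcpN_nil_left]

lemma drop_set_self (l : List Int) (n : Nat) (v : Int) (h : n < l.length) :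
    (l.set n v).drop n = v :: l.drop (n + 1) := by
  induction n generalizing l with
  | zero => cases l with
    | nil => simp at h
    | cons x xs => simp
  | succ n ih => cases l with
    | nil => simp at h
    | cons x xs => simpa using ih xs (by simpa using h)

lemma foldl_set_countdown_aux (g : Int → Int) :
    ∀ (t : Nat) (a : Int) (arr : List Int), (a + 1).toNat ≤ t → -1 ≤ a → a < arr.length →
    (PySem.List.pyRange a (-1) (-1)).foldl
        (fun A i => PySem.List.pySetD A i (g i)) arr
      = (List.range (a + 1).toNat).map (fun n : Nat => g (n : Int)) ++ arr.drop (a + 1).toNat := by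
  intro t
  induction t with
  | zero =>
    intro a arr ht ha hlen
    have ha1 : a = -1 := by omega
    subst ha1
    rw [PySem.List.pyRange_neg_one_eq_nil le_rfl]
    simp
  | succ t ih =>
    intro a arr ht ha hlen
    by_cases ha0 : 0 ≤ a
    · rw [PySem.List.pyRange_neg_one_cons (by omega : (-1 : Int) < a)]
      simp only [List.foldl_cons]
      rw [PySem.List.pySetD_of_nonneg arr (g a) ha0]
      rw [ih (a - 1) (arr.set a.toNat (g a)) (by omega) (by omega) (by simp; omega)]
      have h1 : (a - 1 + 1).toNat = a.toNat := by omega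
      have h2 : (a + 1).toNat = a.toNat + 1 := by omega
      have h3 : a.toNat < arr.length := by omega
      rw [h1, h2, drop_set_self arr a.toNat (g a) h3, List.range_succ]
      simp [Int.toNat_of_nonneg ha0]
    · have ha1 : a = -1 := by omega
      subst ha1
      rw [PySem.List.pyRange_neg_one_eq_nil le_rfl]
      simp

lemma foldl_set_countdown (g : Int → Int) (a : Int) (arr : List Int)
    (ha : -1 ≤ a) (hlen : a < arr.length) :
    (PySem.List.pyRange a (-1) (-1)).foldl
        (fun A i => PySem.List.pySetD A i (g i)) arr
      = (List.range (a + 1).toNat).map (fun n : Nat => g (n : Int)) ++ arr.drop (a + 1).toNat :=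
  foldl_set_countdown_aux g (a + 1).toNat a arr le_rfl ha hlen

-- A also computes the reversed Z-array of the reversed pattern
lemma suffix_main (L : List Char) :
    (PySem.List.pyRange ((L.length : Int) - 2) (-1) (-1)).foldl
        (fun arr i => PySem.List.pySetD arr i (i - suffixWhile L i ((L.length : Int) - 1)))
        (List.replicate ((L.length : Int)).toNat ((L.length : Int)))
      = ((List.range L.reverse.length).map
          (fun k => ((zf L.reverse k : Nat) : Int))).reverse := by
  rcases Nat.eq_zero_or_pos L.length with hm | hm
  · have hL : L = [] := List.eq_nil_of_length_eq_zero hm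
    subst hL
    rw [PySem.List.pyRange_neg_one_eq_nil (by norm_num)]
    simp
  · have hmi : (1 : Int) ≤ L.length := by exact_mod_cast hm
    rw [foldl_set_countdown _ ((L.length : Int) - 2) _ (by omega)
        (by simp only [List.length_replicate]; omega)]
    have ht1 : ((L.length : Int) - 2 + 1).toNat = L.length - 1 := by omega
    have ht2 : ((L.length : Int)).toNat = L.length := by omega
    rw [ht1, ht2, List.drop_replicate]
    have hrep : L.length - (L.length - 1) = 1 := by omega
    rw [hrep]
    apply List.ext_getElem
    · simp; omega
    · intro i h1 h2
      have hi : i < L.length := by simpa using h2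
      have hB : (((List.range L.reverse.length).map
            (fun k => ((zf L.reverse k : Nat) : Int))).reverse)[i]'h2
          = ((zf L.reverse (L.length - 1 - i) : Nat) : Int) := by
        rw [List.getElem_reverse, List.getElem_map, List.getElem_range]
        simp only [List.length_map, List.length_range, List.length_reverse]
      rw [hB]
      rcases Nat.lt_or_ge i (L.length - 1) with hcase | hcase
      · -- left part of the append
        rw [List.getElem_append_left (by simpa using hcase)]
        rw [List.getElem_map, List.getElem_range]
        rw [suffixWhile_eq L (i + 1) i ((L.length : Int) - 1)
            (by omega) (by omega) (by omega) (by omega)]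
        rw [(by omega : ((i : Int) + 1).toNat = i + 1),
            (by omega : ((L.length : Int) - 1 + 1).toNat = L.length)]
        rw [List.take_length]
        have hdrop : L.reverse.drop (L.length - 1 - i) = (L.take (i + 1)).reverse := by
          rw [List.drop_reverse, (by omega : L.length - (L.length - 1 - i) = i + 1)]
        simp only [zf, hdrop]
        rw [lcpN_comm]
        ring
      · -- last cell: i = L.length - 1, the untouched replicate value m
        rw [List.getElem_append_right (by simpa using hcase)]
        rw [List.getElem_replicate]
        have : L.length - 1 - i = 0 := by omega
        rw [this]
        simp [zf, lcpN_self]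

-- ===== VERDICT (by name: the statement is the Claim_ definition above) =====
theorem suffix_spec : Claim_equal_suffix := by
  intro pat _
  unfold Spec_suffix
  rw [suffix_alt_eq]
  simp only [suffix, PySem.Str.len_eq]
  exact suffix_main pat.toList
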